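-- pv_equiv track=rewrite | github.com/olsenw/LeetCodeExercises | Python3/longest_balanced_subarray_I.py | longestBalanced_tle
-- ===== SOURCE A (Python) =====
-- from typing import Counter, List, Dict, Set, Optional
--
-- def longestBalanced_tle(nums: List[int]) -> int:
--     answer = 0
--     c = Counter()
--     for i in range(len(nums)):
--         c[nums[i]] += 1
--         t = Counter(c)
--         for j in range(i):
--             pass
--             if len(t) % 2 == 0 and sum(k % 2 for k in t) == len(t) // 2:
--                 answer = max(answer, i - j + 1)
--             t[nums[j]] -= 1
--             if t[nums[j]] == 0:
--                 del t[nums[j]]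
--     return answer
-- ===== SOURCE B (Python) =====
-- def longestBalanced_tle(nums):
--     n = len(nums)
--     best = 0
--     for l in range(n):
--         for r in range(l, n):
--             distinct = set(nums[l:r + 1])
--             odd = sum(1 for v in distinct if v % 2)
--             if 2 * odd == len(distinct):
--                 best = max(best, r - l + 1)
--     return best
-- ===== Notes on version B (the rewrite author's own statement) =====
-- stated objective: simpler
-- what changed: Replaced A's incremental Counter copy with per-window shrinking/decrement/delete bookkeeping by a plain brute force that rebuilds the distinct-value set of each subarray nums[l:r+1] from scratch and compares the odd count against half the set size directly.
import Mathlib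
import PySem

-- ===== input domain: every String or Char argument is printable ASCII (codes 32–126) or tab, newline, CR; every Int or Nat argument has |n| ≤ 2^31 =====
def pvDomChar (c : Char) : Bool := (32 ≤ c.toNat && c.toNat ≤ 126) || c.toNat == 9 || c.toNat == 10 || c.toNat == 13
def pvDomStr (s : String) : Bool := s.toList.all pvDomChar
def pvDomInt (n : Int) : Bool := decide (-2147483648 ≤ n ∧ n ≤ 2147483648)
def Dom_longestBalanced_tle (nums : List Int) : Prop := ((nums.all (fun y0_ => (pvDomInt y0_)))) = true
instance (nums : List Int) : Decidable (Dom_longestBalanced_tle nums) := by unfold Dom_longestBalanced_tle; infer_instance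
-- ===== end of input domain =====

-- B replaces A's incremental per-window Counter copy/decrement/delete bookkeeping by a plain
-- brute force that rebuilds the distinct-value set of each subarray from scratch (objective:
-- simpler; not faster).

-- ===== PORT A =====
-- the balance test A performs on the counter t: len(t) % 2 == 0 and sum(k % 2 for k in t) == len(t) // 2
def pvCheckA (t : PySem.Dict Int Int) : Bool :=
  (PySem.Int.mod (t.keys.length : Int) 2 == 0) &&
  ((t.keys.map (fun k => PySem.Int.mod k 2)).sum == PySem.Int.floordiv (t.keys.length : Int) 2)

-- one iteration of A's inner loop body (state = (answer, t))
def pvInnerA (nums : List Int) (i : Nat) (p : Int × PySem.Dict Int Int) (j : Nat) :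
    Int × PySem.Dict Int Int :=
  let answer := if pvCheckA p.2 then max p.1 ((i : Int) - (j : Int) + 1) else p.1
  let y := nums.getD j 0
  let t := p.2.modify y 0 (· - 1)
  let t := if t.getD y 0 = 0 then t.erase y else t
  (answer, t)

-- one iteration of A's outer loop body (state = (answer, c))
def pvOuterA (nums : List Int) (st : Int × PySem.Dict Int Int) (i : Nat) :
    Int × PySem.Dict Int Int :=
  let c := st.2.modify (nums.getD i 0) 0 (· + 1)
  (((List.range i).foldl (pvInnerA nums i) (st.1, c)).1, c)

def longestBalanced_tle (nums : List Int) : Int :=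
  ((List.range nums.length).foldl (pvOuterA nums) (0, PySem.Dict.empty)).1

-- ===== PORT B =====
def longestBalanced_tle_alt (nums : List Int) : Int :=
  (List.range nums.length).foldl (fun (best : Int) (l : Nat) =>
    (List.range' l (nums.length - l)).foldl (fun (best : Int) (r : Nat) =>
      let distinct := PySem.Set.ofList
        (PySem.List.slice nums (some (l : Int)) (some ((r : Int) + 1)))
      let odd := distinct.countP (fun v => PySem.Int.mod v 2 != 0)
      if 2 * odd = distinct.length then max best ((r : Int) - (l : Int) + 1) else best)
      best) 0

-- ===== PRECONDITION & SPEC =====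
def Spec_longestBalanced_tle (nums : List Int) (out : Int) : Prop := out = longestBalanced_tle_alt nums
instance (nums : List Int) (out : Int) : Decidable (Spec_longestBalanced_tle nums out) := by unfold Spec_longestBalanced_tle; infer_instance

-- ===== CLAIM (what is proved, stated in full; the proofs are below) =====
def Claim_equal_longestBalanced_tle : Prop := ∀ (nums : List Int), Dom_longestBalanced_tle nums → Spec_longestBalanced_tle nums (longestBalanced_tle nums)

-- ===== LEMMAS AND PROOFS =====

-- the window nums[l..r] (inclusive) as a list
def pvWin (nums : List Int) (l r : Nat) : List Int := (nums.drop l).take (r + 1 - l)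

-- B's balance test on window (l, r)
def pvGood (nums : List Int) (l r : Nat) : Bool :=
  decide (2 * (PySem.Set.ofList (pvWin nums l r)).countP (fun v => PySem.Int.mod v 2 != 0)
          = (PySem.Set.ofList (pvWin nums l r)).length)

-- the invariant A's inner loop maintains: t behaves like Counter(xs) (keys up to order)
def pvInv (t : PySem.Dict Int Int) (xs : List Int) : Prop :=
  t.keys.Nodup ∧ (∀ x : Int, t.getD x 0 = (xs.count x : Int)) ∧ (∀ k : Int, k ∈ t.keys ↔ k ∈ xs)

lemma pv_get?_erase {ν : Type} (d : PySem.Dict Int ν) (k x : Int) :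
    (d.erase k).get? x = if x = k then none else d.get? x := by
  by_cases h : x = k
  · subst h
    rw [if_pos rfl]
    simp only [PySem.Dict.erase, PySem.Dict.get?, List.find?_filter]
    rw [List.find?_eq_none.2 (by intro a _; by_cases hax : a.1 = x <;> simp [hax])]
    rfl
  · rw [if_neg h]
    simp only [PySem.Dict.erase, PySem.Dict.get?, List.find?_filter]
    congr 1
    have hpred : (fun (a : Int × ν) => decide ((!(a.1 == k)) = true ∧ (a.1 == x) = true))
        = (fun (a : Int × ν) => a.1 == x) := by
      funext a
      by_cases hax : a.1 = x
      · have hak : a.1 ≠ k := by rw [hax]; exact h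
        simp [hax]
        exact h
      · simp [hax]
    rw [hpred]

lemma pv_getD_erase {ν : Type} (d : PySem.Dict Int ν) (k x : Int) (dflt : ν) :
    (d.erase k).getD x dflt = if x = k then dflt else d.getD x dflt := by
  simp only [PySem.Dict.getD, pv_get?_erase]
  by_cases h : x = k <;> simp [h]

lemma pv_keys_erase {ν : Type} (d : PySem.Dict Int ν) (k : Int) :
    (d.erase k).keys = d.keys.filter (fun a => !(a == k)) := by
  obtain ⟨l⟩ := d
  induction l with
  | nil => simp [PySem.Dict.erase, PySem.Dict.keys]
  | cons p l ih =>
    by_cases hpk : p.1 = k <;>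
      simpa [PySem.Dict.erase, PySem.Dict.keys, List.filter_cons, hpk] using ih

lemma pvInv_counter (xs : List Int) : pvInv (PySem.Dict.counter xs) xs :=
  ⟨PySem.Dict.nodup_keys_counter xs, fun x => PySem.Dict.getD_counter xs x,
    fun k => by rw [PySem.Dict.keys_counter, PySem.Set.mem_ofList]⟩

lemma pvInv_step (t : PySem.Dict Int Int) (y : Int) (xs : List Int) (h : pvInv t (y :: xs)) :
    pvInv (if (t.modify y 0 (· - 1)).getD y 0 = 0
           then (t.modify y 0 (· - 1)).erase y else t.modify y 0 (· - 1)) xs := by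
  obtain ⟨hnd, hcount, hmem⟩ := h
  have hy : y ∈ t.keys := (hmem y).2 (List.mem_cons_self)
  have hkeys' : (t.modify y 0 (· - 1)).keys = t.keys := by
    rw [PySem.Dict.keys_modify]
    exact PySem.Dict.keys_insert_of_contains _ _ ((PySem.Dict.contains_iff_mem_keys _ _).2 hy)
  have hgetD' : ∀ x : Int, (t.modify y 0 (· - 1)).getD x 0 = (xs.count x : Int) := by
    intro x
    rw [PySem.Dict.getD_modify]
    by_cases hx : x = y
    · subst hx
      have h1 := hcount x
      rw [List.count_cons_self] at h1
      rw [if_pos rfl, h1]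
      push_cast
      ring
    · rw [if_neg hx]
      have h1 := hcount x
      rw [List.count_cons_of_ne (Ne.symm hx)] at h1
      exact h1
  by_cases h0 : (t.modify y 0 (· - 1)).getD y 0 = 0
  · -- count xs y = 0 : the key is deleted
    have hy0 : xs.count y = 0 := by
      have := hgetD' y; rw [h0] at this; exact_mod_cast this.symm
    have hynot : y ∉ xs := by rwa [← List.count_eq_zero]
    rw [if_pos h0]
    refine ⟨?_, ?_, ?_⟩
    · rw [pv_keys_erase, hkeys']
      exact hnd.filter _
    · intro x
      rw [pv_getD_erase]
      by_cases hx : x = y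
      · subst hx; simp [hy0]
      · simp [hx, hgetD' x]
    · intro k
      rw [pv_keys_erase, hkeys', List.mem_filter]
      by_cases hk : k = y
      · subst hk; simp [hynot]
      · simp only [hmem k, List.mem_cons]
        constructor
        · rintro ⟨h1 | h1, _⟩
          · exact absurd h1 hk
          · exact h1
        · intro h1; exact ⟨Or.inr h1, by simpa using hk⟩
  · -- count xs y ≠ 0 : the key survives
    have hy0 : xs.count y ≠ 0 := by
      intro hc
      apply h0
      rw [hgetD' y, hc]; rfl
    have hyin : y ∈ xs := by
      rw [← List.count_pos_iff]; omega
    rw [if_neg h0]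
    refine ⟨by rwa [hkeys'], hgetD', ?_⟩
    intro k
    rw [hkeys', hmem k, List.mem_cons]
    constructor
    · rintro (rfl | h1)
      · exact hyin
      · exact h1
    · exact Or.inr

lemma pvCheckA_eq (t : PySem.Dict Int Int) (xs : List Int) (h : pvInv t xs) :
    pvCheckA t
      = decide (2 * (PySem.Set.ofList xs).countP (fun v => PySem.Int.mod v 2 != 0)
                = (PySem.Set.ofList xs).length) := by
  obtain ⟨hnd, _, hmem⟩ := h
  have hperm : t.keys.Perm (PySem.Set.ofList xs) :=
    (List.perm_ext_iff_of_nodup hnd (PySem.Set.nodup_ofList xs)).2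
      (fun a => by rw [hmem a, PySem.Set.mem_ofList])
  have hlen : t.keys.length = (PySem.Set.ofList xs).length := hperm.length_eq
  have hsum : (t.keys.map (fun k => PySem.Int.mod k 2)).sum
      = ((PySem.Set.ofList xs).map (fun k => PySem.Int.mod k 2)).sum :=
    (hperm.map _).sum_eq
  have hmap : ((PySem.Set.ofList xs).map (fun k => PySem.Int.mod k 2))
      = (PySem.Set.ofList xs).map
          (fun k => if (fun v => PySem.Int.mod v 2 != 0) k then (1 : Int) else 0) := by
    apply List.map_congr_left
    intro k _
    rw [PySem.Int.mod_eq_emod_of_pos (by norm_num)]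
    rcases Int.emod_two_eq k with h2 | h2 <;> simp [h2]
  unfold pvCheckA
  rw [hsum, hlen, hmap, PySem.List.sum_map_ite_one_zero,
    PySem.Int.mod_eq_emod_of_pos (by norm_num), PySem.Int.floordiv_eq_ediv_of_pos (by norm_num)]
  rw [Bool.eq_iff_iff]
  simp only [Bool.and_eq_true, beq_iff_eq, decide_eq_true_eq]
  omega

lemma pvWin_cons (nums : List Int) (l r : Nat) (h1 : l ≤ r) (h2 : l < nums.length) :
    pvWin nums l r = nums[l] :: pvWin nums (l + 1) r := by
  unfold pvWin
  rw [← List.getElem_cons_drop h2]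
  have he : r + 1 - l = (r + 1 - (l + 1)) + 1 := by omega
  rw [he, List.take_succ_cons]

lemma pvGood_diag (nums : List Int) (l : Nat) (h : l < nums.length) :
    pvGood nums l l = false := by
  unfold pvGood
  have h1 : pvWin nums l l = [nums[l]] := by
    rw [pvWin_cons nums l l le_rfl h]
    unfold pvWin
    simp
  have h2 : PySem.Set.ofList [nums[l]] = [nums[l]] := rfl
  rw [h1, h2, decide_eq_false_iff_not]
  rcases Int.emod_two_eq nums[l] with h3 | h3 <;>
    simp [h3]

-- the pure form of A's inner accumulation
def pvPure (nums : List Int) (i : Nat) (ans : Int) (j : Nat) : Int :=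
  if pvGood nums j i then max ans ((i : Int) - (j : Int) + 1) else ans

lemma pvInnerA_spec (nums : List Int) (i : Nat) (hi : i < nums.length) :
    ∀ (k a : Nat) (ans : Int) (t : PySem.Dict Int Int), a + k = i → pvInv t (pvWin nums a i) →
      ((List.range' a k).foldl (pvInnerA nums i) (ans, t)).1
        = (List.range' a k).foldl (pvPure nums i) ans := by
  intro k
  induction k with
  | zero => intro a ans t _ _; simp
  | succ k ih =>
    intro a ans t hak hinv
    have hai : a < i := by omega
    have hal : a < nums.length := by omega
    have hwin : pvWin nums a i = nums[a] :: pvWin nums (a + 1) i :=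
      pvWin_cons nums a i (by omega) hal
    have hcheck : pvCheckA t = pvGood nums a i := by
      rw [pvCheckA_eq t (pvWin nums a i) hinv]; rfl
    rw [List.range'_succ, List.foldl_cons, List.foldl_cons]
    have hstep : pvInnerA nums i (ans, t) a
        = (pvPure nums i ans a,
           if (t.modify nums[a] 0 (· - 1)).getD nums[a] 0 = 0
           then (t.modify nums[a] 0 (· - 1)).erase nums[a] else t.modify nums[a] 0 (· - 1)) := by
      unfold pvInnerA pvPure
      rw [List.getD_eq_getElem nums 0 hal, hcheck]
    rw [hstep]
    apply ih (a + 1) _ _ (by omega)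
    rw [hwin] at hinv
    exact pvInv_step t nums[a] (pvWin nums (a + 1) i) hinv

lemma pvOuterA_spec (nums : List Int) :
    ∀ (k a : Nat) (ans : Int) (c : PySem.Dict Int Int), a + k = nums.length →
      c = PySem.Dict.counter (nums.take a) →
      ((List.range' a k).foldl (pvOuterA nums) (ans, c)).1
        = (List.range' a k).foldl
            (fun ans i => (List.range i).foldl (pvPure nums i) ans) ans := by
  intro k
  induction k with
  | zero => intro a ans c _ _; simp
  | succ k ih =>
    intro a ans c hak hc
    have hal : a < nums.length := by omega
    have hc' : c.modify (nums.getD a 0) 0 (· + 1) = PySem.Dict.counter (nums.take (a + 1)) := by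
      rw [hc, List.getD_eq_getElem nums 0 hal]
      have htake : nums.take (a + 1) = nums.take a ++ [nums[a]] := by
        rw [List.take_succ, List.getElem?_eq_getElem hal]
        rfl
      rw [htake, PySem.Dict.counter_append_singleton]
    rw [List.range'_succ, List.foldl_cons, List.foldl_cons]
    have hinner : pvOuterA nums (ans, c) a
        = ((List.range a).foldl (pvPure nums a) ans, PySem.Dict.counter (nums.take (a + 1))) := by
      have hwin0 : pvWin nums 0 a = nums.take (a + 1) := by unfold pvWin; simp
      unfold pvOuterA
      simp only [hc']
      rw [List.range_eq_range',
        pvInnerA_spec nums a hal a 0 ans (PySem.Dict.counter (nums.take (a + 1))) (by omega)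
          (by rw [hwin0]; exact pvInv_counter _)]
    rw [hinner]
    exact ih (a + 1) _ _ (by omega) rfl

lemma A_char (nums : List Int) :
    longestBalanced_tle nums
      = (List.range nums.length).foldl
          (fun ans i => (List.range i).foldl (pvPure nums i) ans) 0 := by
  unfold longestBalanced_tle
  rw [List.range_eq_range']
  apply pvOuterA_spec nums nums.length 0 0 PySem.Dict.empty (by omega)
  rfl

lemma B_char (nums : List Int) :
    longestBalanced_tle_alt nums
      = (List.range nums.length).foldl
          (fun best l => (List.range' l (nums.length - l)).foldl
            (fun best r => if pvGood nums l r then max best ((r : Int) - (l : Int) + 1) else best)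
            best) 0 := by
  unfold longestBalanced_tle_alt
  apply List.foldl_ext
  intro best l _
  apply List.foldl_ext
  intro best' r _
  have hslice : PySem.List.slice nums (some (l : Int)) (some ((r : Int) + 1)) = pvWin nums l r := by
    have h1 : ((r : Int) + 1) = ((r + 1 : Nat) : Int) := by push_cast; ring
    rw [h1, PySem.List.slice_natCast]
    rfl
  simp only [hslice, pvGood, decide_eq_true_eq]

lemma pvFoldl_le_iff {α : Type} (F : Int → α → Int) (Q : α → Int → Prop)
    (h : ∀ (a : Int) (p : α) (x : Int), F a p ≤ x ↔ a ≤ x ∧ Q p x) :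
    ∀ (l : List α) (a x : Int), l.foldl F a ≤ x ↔ a ≤ x ∧ ∀ p ∈ l, Q p x := by
  intro l
  induction l with
  | nil => intro a x; simp
  | cons p l ih =>
    intro a x
    rw [List.foldl_cons, ih, h]
    simp only [List.mem_cons]
    constructor
    · rintro ⟨⟨h1, h2⟩, h3⟩
      exact ⟨h1, fun q hq => hq.elim (fun e => e ▸ h2) (h3 q)⟩
    · rintro ⟨h1, h2⟩
      exact ⟨⟨h1, h2 p (Or.inl rfl)⟩, fun q hq => h2 q (Or.inr hq)⟩

lemma pvIfMax_le {α : Type} (c : α → Bool) (v : α → Int) (a : Int) (p : α) (x : Int) :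
    (if c p then max a (v p) else a) ≤ x ↔ a ≤ x ∧ (c p = true → v p ≤ x) := by
  by_cases h : c p = true <;> simp [h]

lemma A_le_iff (nums : List Int) (x : Int) :
    longestBalanced_tle nums ≤ x ↔
      0 ≤ x ∧ ∀ i < nums.length, ∀ j < i,
        pvGood nums j i = true → (i : Int) - (j : Int) + 1 ≤ x := by
  rw [A_char]
  rw [pvFoldl_le_iff _ (fun i x => ∀ j ∈ List.range i, pvGood nums j i = true → (i : Int) - (j : Int) + 1 ≤ x)
    (fun a i x => pvFoldl_le_iff (pvPure nums i)
      (fun j x => pvGood nums j i = true → (i : Int) - (j : Int) + 1 ≤ x)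
      (fun a j x => pvIfMax_le (fun j => pvGood nums j i) (fun j => (i : Int) - (j : Int) + 1) a j x)
      (List.range i) a x)]
  simp [List.mem_range]

lemma B_le_iff (nums : List Int) (x : Int) :
    longestBalanced_tle_alt nums ≤ x ↔
      0 ≤ x ∧ ∀ l < nums.length, ∀ r, l ≤ r → r < nums.length →
        pvGood nums l r = true → (r : Int) - (l : Int) + 1 ≤ x := by
  rw [B_char]
  rw [pvFoldl_le_iff _ (fun l x => ∀ r ∈ List.range' l (nums.length - l),
        pvGood nums l r = true → (r : Int) - (l : Int) + 1 ≤ x)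
    (fun a l x => pvFoldl_le_iff _
      (fun r x => pvGood nums l r = true → (r : Int) - (l : Int) + 1 ≤ x)
      (fun a r x => pvIfMax_le (fun r => pvGood nums l r) (fun r => (r : Int) - (l : Int) + 1) a r x)
      (List.range' l (nums.length - l)) a x)]
  simp only [List.mem_range, List.mem_range'_1]
  constructor
  · rintro ⟨h0, hall⟩
    exact ⟨h0, fun l hl r hlr hr => hall l hl r ⟨hlr, by omega⟩⟩
  · rintro ⟨h0, hall⟩
    exact ⟨h0, fun l hl r ⟨hlr, hr⟩ => hall l hl r hlr (by omega)⟩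

lemma pv_main (nums : List Int) : longestBalanced_tle nums = longestBalanced_tle_alt nums := by
  apply le_antisymm
  · rw [A_le_iff]
    obtain ⟨h0, hall⟩ := (B_le_iff nums (longestBalanced_tle_alt nums)).1 le_rfl
    exact ⟨h0, fun i hi j hji hg => hall j (lt_trans hji hi) i (le_of_lt hji) hi hg⟩
  · rw [B_le_iff]
    obtain ⟨h0, hall⟩ := (A_le_iff nums (longestBalanced_tle nums)).1 le_rfl
    refine ⟨h0, ?_⟩
    intro l hl r hlr hr hg
    rcases eq_or_lt_of_le hlr with rfl | hlt
    · rw [pvGood_diag nums l hl] at hg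
      cases hg
    · exact hall r hr l hlt hg

-- ===== VERDICT (by name: the statement is the Claim_ definition above) =====
theorem longestBalanced_tle_spec : Claim_equal_longestBalanced_tle := by
  intro nums _
  unfold Spec_longestBalanced_tle
  exact pv_main nums
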